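-- pv_equiv track=rewrite | github.com/luizedu9/ScryX | backup/simulated_annealing_v1/simulated_annealing.py | set_quantity_content
-- ===== SOURCE A (Python) =====
-- def set_quantity_content(quantity, field):
--     # FIELD É O CAMPO DA MATRIZ QUE CONTEM UMA LISTA DE TUPLAS DE (QUANTIDADE, PREÇO)
--     quantity_list_result = []
--     for tuplex in field:
--         if (tuplex[0] >= quantity):
--             quantity_list_result.append((quantity, tuplex[1]))
--             return(quantity_list_result)
--         else:
--             quantity_list_result.append((tuplex[0], tuplex[1]))
--             quantity -= tuplex[0]
--     return(quantity_list_result)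
-- ===== SOURCE B (Python) =====
-- def set_quantity_content(quantity, field):
--     # Prefix-sum table first, then build the result in one shot.
--     cums = []
--     s = 0
--     for t in field:
--         s += t[0]
--         cums.append(s)
--     for i, c in enumerate(cums):
--         if c >= quantity:
--             prev = cums[i - 1] if i > 0 else 0
--             return [(t[0], t[1]) for t in field[:i]] + [(quantity - prev, field[i][1])]
--     return [(t[0], t[1]) for t in field]
-- ===== Notes on version B (the rewrite author's own statement) =====
-- stated objective: alternative
-- what changed: Replaces the single greedy loop that mutates a running remainder with a prefix-sum table plus a first-index search, building the result by take/map and one adjusted tuple instead of appending inside the loop.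
import Mathlib
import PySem

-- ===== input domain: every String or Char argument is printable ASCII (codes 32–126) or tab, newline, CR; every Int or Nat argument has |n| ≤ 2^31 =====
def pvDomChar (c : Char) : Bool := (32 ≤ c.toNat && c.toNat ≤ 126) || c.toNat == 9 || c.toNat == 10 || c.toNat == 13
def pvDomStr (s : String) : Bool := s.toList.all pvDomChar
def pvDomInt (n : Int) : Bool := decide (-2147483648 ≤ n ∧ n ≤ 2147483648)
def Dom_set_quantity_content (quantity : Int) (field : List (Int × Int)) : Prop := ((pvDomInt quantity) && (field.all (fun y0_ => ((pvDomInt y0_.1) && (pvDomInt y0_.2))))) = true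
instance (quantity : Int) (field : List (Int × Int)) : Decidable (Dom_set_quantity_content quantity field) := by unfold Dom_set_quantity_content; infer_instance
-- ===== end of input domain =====

-- B replaces A's single remainder-mutating greedy loop by a prefix-sum table plus a first-index search (alternative decomposition, same cost); return values proved equal on all inputs.
-- ===== PORT A =====
-- literal port of A's loop: accumulator list, running quantity, early return on first tuple with qty ≥ remaining
def sqcGoA (quantity : Int) (field : List (Int × Int)) (acc : List (Int × Int)) : List (Int × Int) :=
  match field with
  | [] => acc
  | t :: rest =>
    if t.1 ≥ quantity then acc ++ [(quantity, t.2)]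
    else sqcGoA (quantity - t.1) rest (acc ++ [(t.1, t.2)])

def set_quantity_content (quantity : Int) (field : List (Int × Int)) : List (Int × Int) :=
  sqcGoA quantity field []

-- ===== PORT B =====
-- prefix sums of the quantity coordinates (the first loop of Source B)
def sqcCums (field : List (Int × Int)) (s : Int) : List Int :=
  match field with
  | [] => []
  | t :: rest => (s + t.1) :: sqcCums rest (s + t.1)

-- the enumerate loop of Source B: first index (from i) whose cumulative sum ≥ quantity
def sqcFind (quantity : Int) (cums : List Int) (i : Nat) : Option Nat :=
  match cums with
  | [] => none
  | c :: rest => if c ≥ quantity then some i else sqcFind quantity rest (i + 1)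

def set_quantity_content_alt (quantity : Int) (field : List (Int × Int)) : List (Int × Int) :=
  let cums := sqcCums field 0
  match sqcFind quantity cums 0 with
  | none => field.map (fun t => (t.1, t.2))
  | some i =>
    let prev := if i > 0 then cums.getD (i - 1) 0 else 0
    (field.take i).map (fun t => (t.1, t.2)) ++ [(quantity - prev, (field.getD i (0, 0)).2)]

-- ===== PRECONDITION & SPEC =====

def Spec_set_quantity_content (quantity : Int) (field : List (Int × Int)) (out : List (Int × Int)) : Prop := out = set_quantity_content_alt quantity field
instance (quantity : Int) (field : List (Int × Int)) (out : List (Int × Int)) : Decidable (Spec_set_quantity_content quantity field out) := by unfold Spec_set_quantity_content; infer_instance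

-- ===== CLAIM (what is proved, stated in full; the proofs are below) =====
def Claim_equal_set_quantity_content : Prop := ∀ (quantity : Int) (field : List (Int × Int)), Dom_set_quantity_content quantity field → Spec_set_quantity_content quantity field (set_quantity_content quantity field)


-- ===== LEMMAS AND PROOFS =====
-- simple recursive characterisation both ports are reduced to
def sqcSpec (quantity : Int) (field : List (Int × Int)) : List (Int × Int) :=
  match field with
  | [] => []
  | t :: rest => if t.1 ≥ quantity then [(quantity, t.2)] else (t.1, t.2) :: sqcSpec (quantity - t.1) rest

theorem sqcGoA_eq (field : List (Int × Int)) : ∀ (quantity : Int) (acc : List (Int × Int)),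
    sqcGoA quantity field acc = acc ++ sqcSpec quantity field := by
  induction field with
  | nil => intro q acc; simp [sqcGoA, sqcSpec]
  | cons t rest ih =>
    intro q acc
    simp only [sqcGoA, sqcSpec]
    split
    · rfl
    · rw [ih]; simp

theorem sqcFind_shift (cums : List Int) : ∀ (quantity : Int) (i : Nat),
    sqcFind quantity cums i = (sqcFind quantity cums 0).map (· + i) := by
  induction cums with
  | nil => intro q i; simp [sqcFind]
  | cons c rest ih =>
    intro q i
    simp only [sqcFind]
    split
    · simp
    · rw [ih q (i + 1), ih q 1, Option.map_map]
      cases sqcFind q rest 0 <;> simp <;> omega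

theorem sqcCums_shift (field : List (Int × Int)) : ∀ (s : Int),
    sqcCums field s = (sqcCums field 0).map (s + ·) := by
  induction field with
  | nil => intro s; simp [sqcCums]
  | cons t rest ih =>
    intro s
    simp only [sqcCums]
    rw [ih (s + t.1), ih (0 + t.1)]
    simp only [List.map_cons, List.map_map, List.cons.injEq]
    refine ⟨by omega, ?_⟩
    apply List.map_congr_left; intro x _; simp [Function.comp]; omega

theorem sqcFind_map_add (cums : List Int) : ∀ (quantity a : Int) (i : Nat),
    sqcFind quantity (cums.map (a + ·)) i = sqcFind (quantity - a) cums i := by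
  induction cums with
  | nil => intro q a i; simp [sqcFind]
  | cons c rest ih =>
    intro q a i
    simp only [List.map_cons, sqcFind]
    by_cases hc : c ≥ q - a
    · rw [if_pos (by omega), if_pos hc]
    · rw [if_neg (by omega), if_neg hc, ih]

theorem sqcCums_length (field : List (Int × Int)) : ∀ s, (sqcCums field s).length = field.length := by
  induction field with
  | nil => intro s; rfl
  | cons t rest ih => intro s; simp [sqcCums, ih]

theorem sqcFind_lt (cums : List Int) : ∀ (quantity : Int) (i j : Nat),
    sqcFind quantity cums i = some j → i ≤ j ∧ j - i < cums.length := by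
  induction cums with
  | nil => intro q i j h; simp [sqcFind] at h
  | cons c rest ih =>
    intro q i j h
    simp only [sqcFind] at h
    split at h
    · injection h with h'; subst h'; simp only [List.length_cons]; omega
    · have := ih q (i + 1) j h; simp only [List.length_cons]; omega

theorem getD_map_add (L : List Int) : ∀ (a : Int) (k : Nat), k < L.length →
    (L.map (fun x => a + x)).getD k 0 = a + L.getD k 0 := by
  induction L with
  | nil => intro a k h; simp at h
  | cons c rest ih =>
    intro a k h
    cases k with
    | zero => simp
    | succ k =>
      simp only [List.map_cons, List.getD_cons_succ]
      exact ih a k (by simp at h; omega)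

theorem sqc_alt_eq_spec (field : List (Int × Int)) : ∀ (quantity : Int),
    set_quantity_content_alt quantity field = sqcSpec quantity field := by
  induction field with
  | nil => intro q; rfl
  | cons t rest ih =>
    intro q
    simp only [set_quantity_content_alt, sqcCums, sqcFind, sqcSpec, zero_add] at *
    by_cases hq : t.1 ≥ q
    · simp [hq]
    · rw [if_neg hq, if_neg hq]
      rw [sqcFind_shift _ q 1, sqcCums_shift rest t.1, sqcFind_map_add]
      rw [← ih (q - t.1)]
      cases hf : sqcFind (q - t.1) (sqcCums rest 0) 0 with
      | none => simp
      | some i =>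
        simp only [Option.map_some, List.take_succ_cons, List.map_cons, List.cons_append,
          List.getD_cons_succ, Nat.add_sub_cancel, gt_iff_lt, Nat.succ_pos, if_pos]
        obtain ⟨-, hlen⟩ := sqcFind_lt _ _ _ _ hf
        rw [sqcCums_length] at hlen
        have hstep : (t.1 :: (sqcCums rest 0).map (fun x => t.1 + x)).getD i 0
            = t.1 + (if 0 < i then (sqcCums rest 0).getD (i - 1) 0 else 0) := by
          cases i with
          | zero => simp
          | succ k =>
            simp only [List.getD_cons_succ, if_pos (Nat.succ_pos k), Nat.add_sub_cancel]
            exact getD_map_add _ t.1 k (by rw [sqcCums_length]; omega)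
        rw [hstep, sub_add_eq_sub_sub]

-- ===== VERDICT (by name: the statement is the Claim_ definition above) =====
theorem set_quantity_content_spec : Claim_equal_set_quantity_content := by
  intro quantity field _
  unfold Spec_set_quantity_content set_quantity_content
  rw [sqcGoA_eq, sqc_alt_eq_spec]
  simp
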